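-- pv_equiv track=rewrite | github.com/williandres/work_fiverr | csv_to_json/main.py | soft_acts
-- ===== SOURCE A (Python) =====
-- def soft_acts(tuki):
--     polla = {}
--     par = 0
--     for i in tuki:
--         if par == 0:
--             clave = i
--             par += 1
--         elif par == 1:
--             polla[clave.strip()] = i.strip()
--             par = 0
--
--     return polla
-- ===== SOURCE B (Python) =====
-- def soft_acts(tuki):
--     t = [s.strip() for s in tuki]
--     return dict(zip(t[::2], t[1::2]))
-- ===== Notes on version B (the rewrite author's own statement) =====
-- stated objective: idiomatic
-- what changed: Replaces the stateful parity-toggle single pass (which strips lazily as it inserts) with staged passes: strip every element first, split the list into even- and odd-index strided slices, and feed their zip to the dict constructor.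
import Mathlib
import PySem

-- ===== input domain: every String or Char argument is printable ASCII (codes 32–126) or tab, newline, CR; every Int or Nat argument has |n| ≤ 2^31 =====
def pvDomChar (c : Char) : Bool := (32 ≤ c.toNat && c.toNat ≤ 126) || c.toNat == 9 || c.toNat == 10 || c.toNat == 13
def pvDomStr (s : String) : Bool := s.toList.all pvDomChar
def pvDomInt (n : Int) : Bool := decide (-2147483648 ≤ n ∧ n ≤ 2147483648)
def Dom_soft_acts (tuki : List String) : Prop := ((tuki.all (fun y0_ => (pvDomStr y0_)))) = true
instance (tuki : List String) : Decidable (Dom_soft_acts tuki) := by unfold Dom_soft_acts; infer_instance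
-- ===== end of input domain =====

-- B replaces A's parity-toggle state machine (stripping as it inserts) with staged passes:
-- strip every element, split into even/odd strided slices, zip them into the dict; same cost, plainer code.

-- ===== PORT A =====
-- A: polla = {}; par = 0; for i in tuki: if par == 0: clave = i; par += 1
--    elif par == 1: polla[clave.strip()] = i.strip(); par = 0; return polla
def soft_acts (tuki : List String) : List (String × String) :=
  (tuki.foldl
    (fun (st : PySem.Dict String String × Int × String) i =>
      if st.2.1 == 0 then (st.1, st.2.1 + 1, i)
      else if st.2.1 == 1 then
        (st.1.insert (PySem.Str.strip st.2.2) (PySem.Str.strip i), 0, st.2.2)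
      else st)
    (PySem.Dict.empty, 0, "")).1.items

-- ===== PORT B =====
-- B: t = [s.strip() for s in tuki]; return dict(zip(t[::2], t[1::2]))
-- (slice? never returns none for step 2 ≠ 0; .getD [] only totalizes the Option)
def soft_acts_alt (tuki : List String) : List (String × String) :=
  let t := tuki.map PySem.Str.strip
  let ks := (PySem.List.slice? t none none 2).getD []
  let vs := (PySem.List.slice? t (some 1) none 2).getD []
  ((ks.zip vs).foldl
    (fun (d : PySem.Dict String String) p => d.insert p.1 p.2)
    PySem.Dict.empty).items

-- ===== PRECONDITION & SPEC =====
def Spec_soft_acts (tuki : List String) (out : List (String × String)) : Prop := out = soft_acts_alt tuki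
instance (tuki : List String) (out : List (String × String)) : Decidable (Spec_soft_acts tuki out) := by unfold Spec_soft_acts; infer_instance

-- ===== CLAIM (what is proved, stated in full; the proofs are below) =====
def Claim_equal_soft_acts : Prop := ∀ (tuki : List String), Dom_soft_acts tuki → Spec_soft_acts tuki (soft_acts tuki)

-- ===== LEMMAS AND PROOFS =====

-- elements at even indices
def pvEvens {α : Type} : List α → List α
  | x :: _ :: r => x :: pvEvens r
  | [x] => [x]
  | [] => []

-- consecutive non-overlapping pairs
def pvPairs {α : Type} : List α → List (α × α)
  | x :: y :: r => (x, y) :: pvPairs r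
  | _ => []

-- A's loop body, named for the invariant
def pvStepA (st : PySem.Dict String String × Int × String) (i : String) :
    PySem.Dict String String × Int × String :=
  if st.2.1 == 0 then (st.1, st.2.1 + 1, i)
  else if st.2.1 == 1 then
    (st.1.insert (PySem.Str.strip st.2.2) (PySem.Str.strip i), 0, st.2.2)
  else st

-- loop invariant: A's fold from par = 0 builds the dict of the stripped pairs;
-- from par = 1 with pending key c it behaves like the pairs of c :: l
theorem pv_inv (l : List String) :
    (∀ (d : PySem.Dict String String) (c : String),
        (l.foldl pvStepA (d, 0, c)).1
          = (pvPairs l).foldl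
              (fun d p => d.insert (PySem.Str.strip p.1) (PySem.Str.strip p.2)) d) ∧
    (∀ (d : PySem.Dict String String) (c : String),
        (l.foldl pvStepA (d, 1, c)).1
          = (pvPairs (c :: l)).foldl
              (fun d p => d.insert (PySem.Str.strip p.1) (PySem.Str.strip p.2)) d) := by
  induction l with
  | nil => exact ⟨fun d c => rfl, fun d c => rfl⟩
  | cons x rest ih =>
    constructor
    · intro d c
      have h0 : (x :: rest).foldl pvStepA (d, 0, c) = rest.foldl pvStepA (d, 1, x) := by
        simp [List.foldl, pvStepA]
      rw [h0, ih.2 d x]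
    · intro d c
      have h1 : (x :: rest).foldl pvStepA (d, 1, c)
          = rest.foldl pvStepA (d.insert (PySem.Str.strip c) (PySem.Str.strip x), 0, c) := by
        simp [List.foldl, pvStepA]
      rw [h1, ih.1]
      rfl

theorem pv_filterMap_evens {α : Type} (xs : List α) :
    List.filterMap (fun k : Nat => xs[2*k]?) (List.range ((xs.length+1)/2)) = pvEvens xs := by
  induction xs using pvEvens.induct with
  | case1 x y r ih =>
    have hc : ((x :: y :: r).length + 1)/2 = (r.length + 1)/2 + 1 := by
      simp [List.length_cons]; omega
    rw [hc, List.range_succ_eq_map, List.filterMap_cons, List.filterMap_map]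
    simp only [Function.comp_def]
    have hidx : (fun k : Nat => (x :: y :: r)[2*(k+1)]?) = (fun k : Nat => r[2*k]?) := by
      funext k
      have h2 : 2*(k+1) = (2*k + 1) + 1 := by omega
      rw [h2, List.getElem?_cons_succ, List.getElem?_cons_succ]
    simp only [Nat.succ_eq_add_one] at *
    rw [hidx, ih]
    rfl
  | case2 x => simp [pvEvens]
  | case3 => simp [pvEvens]

theorem pv_slice2 {α : Type} (xs : List α) :
    PySem.List.slice? xs none none 2 = some (pvEvens xs) := by
  rw [← pv_filterMap_evens]
  simp only [PySem.List.slice?, PySem.List.sliceIndices]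
  norm_num
  have hc : (if 0 < xs.length then (((xs.length : Int) + 2 - 1) / 2).toNat else 0)
      = (xs.length + 1)/2 := by
    split
    · omega
    · omega
  rw [hc]
  apply List.filterMap_congr
  intro k _
  congr 1

theorem pv_slice2_odd {α : Type} (xs : List α) :
    PySem.List.slice? xs (some 1) none 2 = some (pvEvens xs.tail) := by
  rw [← pv_filterMap_evens]
  simp only [PySem.List.slice?, PySem.List.sliceIndices]
  norm_num
  have hc : (if 1 < xs.length then (((xs.length : Int) - min 1 (xs.length : Int) + 2 - 1) / 2).toNat else 0)
      = (xs.length - 1 + 1)/2 := by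
    split
    · omega
    · omega
  rw [hc]
  apply List.filterMap_congr
  intro k hk
  simp only [List.mem_range] at hk
  congr 1
  omega

theorem pv_evens_cons {α : Type} (a : α) (l : List α) :
    pvEvens (a :: l) = a :: pvEvens l.tail := by
  cases l <;> rfl

theorem pv_zip_evens {α : Type} (l : List α) :
    (pvEvens l).zip (pvEvens l.tail) = pvPairs l := by
  induction l using pvEvens.induct with
  | case1 x y r ih => rw [show pvEvens (x :: y :: r) = x :: pvEvens r from rfl, List.tail_cons, pv_evens_cons y r, List.zip_cons_cons, ih]; rfl
  | case2 x => rfl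
  | case3 => rfl

theorem pv_pairs_map {α β : Type} (f : α → β) (l : List α) :
    pvPairs (l.map f) = (pvPairs l).map (fun p => (f p.1, f p.2)) := by
  induction l using pvEvens.induct with
  | case1 x y r ih => simp [pvPairs, ih]
  | case2 x => rfl
  | case3 => rfl

-- ===== VERDICT (by name: the statement is the Claim_ definition above) =====
theorem soft_acts_spec : Claim_equal_soft_acts := by
  intro tuki _
  show soft_acts tuki = soft_acts_alt tuki
  unfold soft_acts soft_acts_alt
  simp only [pv_slice2, pv_slice2_odd, Option.getD_some]
  rw [pv_zip_evens, pv_pairs_map, List.foldl_map]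
  exact congrArg PySem.Dict.items ((pv_inv tuki).1 PySem.Dict.empty "")
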